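-- pv_equiv track=rewrite | github.com/Kapil-Waghumbare/SpectroGuard-BE-Project | Scripts/higher order score.py | build_ngram_transitions
-- ===== SOURCE A (Python) =====
-- def build_ngram_transitions(seq, order):
--     """Build transition counts for an n-gram model."""
--     transitions = {}
--     for i in range(len(seq) - order):
--         state = tuple(seq[i:i + order])
--         next_s = seq[i + order]
--         transitions.setdefault(state, {})
--         transitions[state][next_s] = transitions[state].get(next_s, 0) + 1
--     return transitions
-- ===== SOURCE B (Python) =====
-- def build_ngram_transitions(seq, order):
--     """Build transition counts for an n-gram model."""
--     # pass 1: flat count table keyed by the (state, next) pair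
--     counts = {}
--     for i in range(len(seq) - order):
--         key = (tuple(seq[i:i + order]), seq[i + order])
--         counts[key] = counts.get(key, 0) + 1
--     # pass 2: reshape the flat table into the nested dict-of-dicts
--     result = {}
--     for (state, next_s), c in counts.items():
--         result.setdefault(state, {})[next_s] = c
--     return result
-- ===== Notes on version B (the rewrite author's own statement) =====
-- stated objective: alternative
-- what changed: A accumulates the nested dict-of-dicts in one in-place pass; B first builds a flat count table keyed by the (state, next) pair and then reshapes that table into the nested result in a second pass.
import Mathlib
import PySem

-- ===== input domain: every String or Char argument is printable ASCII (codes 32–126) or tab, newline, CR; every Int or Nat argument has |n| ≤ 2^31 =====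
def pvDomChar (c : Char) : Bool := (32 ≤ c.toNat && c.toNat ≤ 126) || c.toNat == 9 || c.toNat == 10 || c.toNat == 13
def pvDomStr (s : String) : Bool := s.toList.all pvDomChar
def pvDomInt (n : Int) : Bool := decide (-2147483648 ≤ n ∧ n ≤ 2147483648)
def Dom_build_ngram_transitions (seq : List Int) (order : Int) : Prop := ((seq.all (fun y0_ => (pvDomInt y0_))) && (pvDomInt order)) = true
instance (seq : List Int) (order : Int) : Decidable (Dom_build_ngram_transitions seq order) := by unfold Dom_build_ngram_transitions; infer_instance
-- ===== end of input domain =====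

-- B replaces A's single in-place accumulation of the nested dict with two passes: a flat
-- (state, next) count table, then a reshape of that table into the nested result (objective: alternative).

-- ===== PORT A =====
-- loop body of A's single pass ('for i in range(len(seq) - order): ...')
def pyAStep (seq : List Int) (order : Int)
    (transitions : PySem.Dict (List Int) (PySem.Dict Int Int)) (i : Int) :
    PySem.Dict (List Int) (PySem.Dict Int Int) :=
  match PySem.List.pyGet? seq (i + order) with
  | none => transitions  -- seq[i + order] raises IndexError in Python; Pre_ excludes these inputs
  | some next_s =>
    let state := PySem.List.slice seq i (i + order)
    let t1 := transitions.setdefault state PySem.Dict.empty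
    let inner := t1.getD state PySem.Dict.empty  -- transitions[state]; key present after setdefault
    t1.insert state (inner.insert next_s (inner.getD next_s 0 + 1))

def build_ngram_transitions (seq : List Int) (order : Int) : List (List Int × List (Int × Int)) :=
  let transitions :=
    (PySem.List.pyRange 0 ((seq.length : Int) - order) 1).foldl (pyAStep seq order) PySem.Dict.empty
  transitions.items.map (fun p => (p.1, p.2.items))

-- ===== PORT B =====
-- pass 1 loop body: flat count table keyed by the (state, next) pair
def pyBCountStep (seq : List Int) (order : Int)
    (counts : PySem.Dict (List Int × Int) Int) (i : Int) : PySem.Dict (List Int × Int) Int :=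
  match PySem.List.pyGet? seq (i + order) with
  | none => counts  -- seq[i + order] raises IndexError in Python; Pre_ excludes these inputs
  | some nx =>
    let key := (PySem.List.slice seq i (i + order), nx)
    counts.insert key (counts.getD key 0 + 1)

-- pass 2 loop body: 'result.setdefault(state, {})[next_s] = c'
def pyBReshapeStep (result : PySem.Dict (List Int) (PySem.Dict Int Int))
    (q : (List Int × Int) × Int) : PySem.Dict (List Int) (PySem.Dict Int Int) :=
  let r1 := result.setdefault q.1.1 PySem.Dict.empty
  r1.insert q.1.1 ((r1.getD q.1.1 PySem.Dict.empty).insert q.1.2 q.2)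

def build_ngram_transitions_alt (seq : List Int) (order : Int) : List (List Int × List (Int × Int)) :=
  let counts :=
    (PySem.List.pyRange 0 ((seq.length : Int) - order) 1).foldl (pyBCountStep seq order) PySem.Dict.empty
  let result := counts.items.foldl pyBReshapeStep PySem.Dict.empty
  result.items.map (fun p => (p.1, p.2.items))

-- ===== PRECONDITION & SPEC =====
-- A raises IndexError exactly when order < -len(seq) (then i = 0 gives seq[order] out of range);
-- Pre_ excludes exactly those inputs.
def Pre_build_ngram_transitions (seq : List Int) (order : Int) : Prop :=
  -(seq.length : Int) ≤ order
instance (seq : List Int) (order : Int) : Decidable (Pre_build_ngram_transitions seq order) := by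
  unfold Pre_build_ngram_transitions; infer_instance

def pvWitness_build_ngram_transitions : List Int × Int := ([1, 2, 1, 2, 3], 1)

def Spec_build_ngram_transitions (seq : List Int) (order : Int) (out : List (List Int × List (Int × Int))) : Prop := out = build_ngram_transitions_alt seq order
instance (seq : List Int) (order : Int) (out : List (List Int × List (Int × Int))) : Decidable (Spec_build_ngram_transitions seq order out) := by unfold Spec_build_ngram_transitions; infer_instance

-- ===== CLAIM (what is proved, stated in full; the proofs are below) =====
def Claim_equal_build_ngram_transitions : Prop := ∀ (seq : List Int) (order : Int), Dom_build_ngram_transitions seq order → Pre_build_ngram_transitions seq order → Spec_build_ngram_transitions seq order (build_ngram_transitions seq order)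

-- ===== LEMMAS AND PROOFS =====

def pairsOf (seq : List Int) (order : Int) : List (List Int × Int) :=
  (PySem.List.pyRange 0 ((seq.length : Int) - order) 1).filterMap
    (fun i => (PySem.List.pyGet? seq (i + order)).map
      (fun nx => (PySem.List.slice seq i (i + order), nx)))
def stepA (d : PySem.Dict (List Int) (PySem.Dict Int Int)) (p : List Int × Int) :
    PySem.Dict (List Int) (PySem.Dict Int Int) :=
  d.insert p.1 ((d.getD p.1 PySem.Dict.empty).insert p.2
    ((d.getD p.1 PySem.Dict.empty).getD p.2 0 + 1))
def stepR (r : PySem.Dict (List Int) (PySem.Dict Int Int)) (q : (List Int × Int) × Int) :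
    PySem.Dict (List Int) (PySem.Dict Int Int) :=
  r.insert q.1.1 ((r.getD q.1.1 PySem.Dict.empty).insert q.1.2 q.2)
theorem setdefault_insert_eq {κ ν : Type} [BEq κ] [LawfulBEq κ] (d : PySem.Dict κ ν) (k : κ) (w v : ν) :
    (d.setdefault k w).insert k v = d.insert k v := by
  by_cases h : d.contains k = true
  · rw [PySem.Dict.setdefault_of_contains d w h]
  · rw [PySem.Dict.setdefault_of_not_contains d w (by simpa using h), PySem.Dict.insert_insert_self]
theorem getD_setdefault_self_empty {κ ν : Type} [BEq κ] [LawfulBEq κ] (d : PySem.Dict κ ν) (k : κ) (w : ν) :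
    (d.setdefault k w).getD k w = d.getD k w := by
  rw [PySem.Dict.getD_eq_get?_getD, PySem.Dict.get?_setdefault_self, PySem.Dict.getD_eq_get?_getD]; rfl
theorem foldl_match_filterMap {α β γ : Type} (l : List α) (f : α → Option β) (g : γ → β → γ) (init : γ) :
    l.foldl (fun acc x => (f x).elim acc (g acc)) init
      = (l.filterMap f).foldl g init := by
  induction l generalizing init with
  | nil => rfl
  | cons x xs ih => cases h : f x <;> simp [h, ih]
theorem pyAStep_eq_stepA (seq : List Int) (order : Int) (d : PySem.Dict (List Int) (PySem.Dict Int Int)) (i : Int) :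
    pyAStep seq order d i =
      match PySem.List.pyGet? seq (i + order) with
      | none => d
      | some nx => stepA d (PySem.List.slice seq i (i + order), nx) := by
  unfold pyAStep stepA
  cases h : PySem.List.pyGet? seq (i + order) with
  | none => rfl
  | some nx => simp only [getD_setdefault_self_empty, setdefault_insert_eq]
theorem pyBReshapeStep_eq_stepR (r : PySem.Dict (List Int) (PySem.Dict Int Int)) (q : (List Int × Int) × Int) :
    pyBReshapeStep r q = stepR r q := by
  unfold pyBReshapeStep stepR
  simp only [getD_setdefault_self_empty, setdefault_insert_eq]
theorem portA_eq_foldA (seq : List Int) (order : Int) :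
    build_ngram_transitions seq order
      = ((pairsOf seq order).foldl stepA PySem.Dict.empty).items.map (fun p => (p.1, p.2.items)) := by
  have hb : pyAStep seq order = (fun acc i =>
      ((PySem.List.pyGet? seq (i + order)).map
          (fun nx => (PySem.List.slice seq i (i + order), nx))).elim acc (stepA acc)) := by
    funext d i
    rw [pyAStep_eq_stepA]
    cases PySem.List.pyGet? seq (i + order) <;> rfl
  have h1 : build_ngram_transitions seq order
      = ((PySem.List.pyRange 0 ((seq.length : Int) - order) 1).foldl (pyAStep seq order)
          PySem.Dict.empty).items.map (fun p => (p.1, p.2.items)) := rfl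
  rw [h1, hb]
  unfold pairsOf
  exact congrArg (fun d : PySem.Dict (List Int) (PySem.Dict Int Int) =>
    d.items.map (fun p => (p.1, p.2.items)))
    (foldl_match_filterMap (PySem.List.pyRange 0 ((seq.length : Int) - order) 1)
      (fun i => (PySem.List.pyGet? seq (i + order)).map
        (fun nx => (PySem.List.slice seq i (i + order), nx))) stepA PySem.Dict.empty)
theorem portB_counts_eq (seq : List Int) (order : Int) :
    (PySem.List.pyRange 0 ((seq.length : Int) - order) 1).foldl (pyBCountStep seq order) PySem.Dict.empty
      = PySem.Dict.counter (pairsOf seq order) := by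
  have hb : pyBCountStep seq order = (fun acc i =>
      ((PySem.List.pyGet? seq (i + order)).map
          (fun nx => (PySem.List.slice seq i (i + order), nx))).elim acc
        (fun p => acc.insert p (acc.getD p 0 + 1))) := by
    funext c i
    unfold pyBCountStep
    cases PySem.List.pyGet? seq (i + order) <;> rfl
  rw [hb]
  unfold pairsOf
  exact (foldl_match_filterMap (PySem.List.pyRange 0 ((seq.length : Int) - order) 1)
      (fun i => (PySem.List.pyGet? seq (i + order)).map
        (fun nx => (PySem.List.slice seq i (i + order), nx)))
      (fun (acc : PySem.Dict (List Int × Int) Int) p => acc.insert p (acc.getD p 0 + 1))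
      PySem.Dict.empty).trans
    (PySem.Dict.foldl_insert_getD_add_one_eq_counter _)
theorem portB_eq_foldR (seq : List Int) (order : Int) :
    build_ngram_transitions_alt seq order
      = (((PySem.Dict.counter (pairsOf seq order)).items.foldl stepR PySem.Dict.empty).items.map
          (fun p => (p.1, p.2.items))) := by
  have h1 : build_ngram_transitions_alt seq order
      = (((PySem.List.pyRange 0 ((seq.length : Int) - order) 1).foldl (pyBCountStep seq order)
            PySem.Dict.empty).items.foldl pyBReshapeStep PySem.Dict.empty).items.map
          (fun p => (p.1, p.2.items)) := rfl
  rw [h1, portB_counts_eq, funext (fun r => funext (pyBReshapeStep_eq_stepR r))]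
def tsOf (ps : List (List Int × Int)) (s : List Int) : List Int :=
  (ps.filter (fun p => p.1 == s)).map Prod.snd

theorem getD_foldA (ps : List (List Int × Int)) (d : PySem.Dict (List Int) (PySem.Dict Int Int)) (s : List Int) :
    (ps.foldl stepA d).getD s PySem.Dict.empty
      = (tsOf ps s).foldl (fun inn t => inn.insert t (inn.getD t 0 + 1)) (d.getD s PySem.Dict.empty) := by
  induction ps generalizing d with
  | nil => rfl
  | cons p ps ih =>
    simp only [List.foldl_cons, ih, tsOf, List.filter_cons]
    by_cases h : p.1 = s
    · subst h
      simp [stepA, PySem.Dict.getD_insert_self]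
    · have hb : (p.1 == s) = false := by simpa using h
      simp only [hb, Bool.false_eq_true, if_false, stepA]
      rw [PySem.Dict.getD_insert_of_ne _ _ _ (fun e => h (Eq.symm e))]

theorem getD_foldR (l : List ((List Int × Int) × Int)) (r : PySem.Dict (List Int) (PySem.Dict Int Int)) (s : List Int) :
    (l.foldl stepR r).getD s PySem.Dict.empty
      = (l.filter (fun q => q.1.1 == s)).foldl (fun inn q => inn.insert q.1.2 q.2) (r.getD s PySem.Dict.empty) := by
  induction l generalizing r with
  | nil => rfl
  | cons q l ih =>
    simp only [List.foldl_cons, ih, List.filter_cons]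
    by_cases h : q.1.1 = s
    · simp only [stepR]
      rw [← h, PySem.Dict.getD_insert_self]
      simp
    · have hb : (q.1.1 == s) = false := by simpa using h
      simp only [hb, Bool.false_eq_true, if_false, stepR]
      rw [PySem.Dict.getD_insert_of_ne _ _ _ (fun e => h (Eq.symm e))]

theorem ofList_map_ofList {α β : Type} [BEq α] [LawfulBEq α] [BEq β] [LawfulBEq β]
    (f : α → β) (l : List α) :
    PySem.Set.ofList ((PySem.Set.ofList l).map f) = PySem.Set.ofList (l.map f) := by
  induction l using List.reverseRecOn with
  | nil => rfl
  | append_singleton xs x ih =>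
    have hmr : List.map f (xs ++ [x]) = List.map f xs ++ [f x] := by simp
    rw [PySem.Set.ofList_append_singleton, hmr, PySem.Set.ofList_append_singleton]
    by_cases hx : x ∈ xs
    · rw [PySem.Set.add_of_mem (by simpa [PySem.Set.mem_ofList] using hx), ih,
        PySem.Set.add_of_mem (by simp only [PySem.Set.mem_ofList, List.mem_map]; exact ⟨x, hx, rfl⟩)]
    · have hml : List.map f (PySem.Set.ofList xs ++ [x]) = List.map f (PySem.Set.ofList xs) ++ [f x] := by simp
      rw [PySem.Set.add_of_not_mem (by simpa [PySem.Set.mem_ofList] using hx), hml,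
        PySem.Set.ofList_append_singleton, ih]
theorem filter_ofList_map_snd (ps : List (List Int × Int)) (s : List Int) :
    ((PySem.Set.ofList ps).filter (fun k => k.1 == s)).map Prod.snd
      = PySem.Set.ofList (tsOf ps s) := by
  induction ps using List.reverseRecOn with
  | nil => rfl
  | append_singleton ps p ih =>
    have hts : tsOf (ps ++ [p]) s
        = if (p.1 == s) = true then tsOf ps s ++ [p.2] else tsOf ps s := by
      simp only [tsOf, List.filter_append, List.map_append]
      by_cases h : (p.1 == s) = true <;> simp [h]
    rw [PySem.Set.ofList_append_singleton, hts]
    by_cases hp : p ∈ ps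
    · rw [PySem.Set.add_of_mem (by simpa [PySem.Set.mem_ofList] using hp)]
      by_cases h : (p.1 == s) = true
      · have hp2 : p.2 ∈ tsOf ps s := by
          simp only [tsOf, List.mem_map, List.mem_filter]
          exact ⟨p, ⟨hp, h⟩, rfl⟩
        rw [if_pos h, PySem.Set.ofList_append_singleton,
          PySem.Set.add_of_mem (by simpa [PySem.Set.mem_ofList] using hp2), ih]
      · rw [if_neg h, ih]
    · rw [PySem.Set.add_of_not_mem (by simpa [PySem.Set.mem_ofList] using hp),
        List.filter_append]
      by_cases h : (p.1 == s) = true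
      · have hp2 : p.2 ∉ tsOf ps s := by
          simp only [tsOf, List.mem_map, List.mem_filter]
          rintro ⟨q, ⟨hq, hqs⟩, hq2⟩
          apply hp
          have h1 : q.1 = p.1 := by
            rw [eq_of_beq hqs, eq_of_beq h]
          have : q = p := Prod.ext h1 hq2
          rwa [← this]
        rw [if_pos h, PySem.Set.ofList_append_singleton,
          PySem.Set.add_of_not_mem (by simpa [PySem.Set.mem_ofList] using hp2), ← ih]
        simp [h]
      · rw [if_neg h, ← ih]
        simp [h]

theorem count_tsOf (ps : List (List Int × Int)) (s : List Int) (t : Int) :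
    (tsOf ps s).count t = ps.count (s, t) := by
  induction ps with
  | nil => rfl
  | cons p ps ih =>
    obtain ⟨a, b⟩ := p
    have hbeq : ((s, t) == (a, b)) = (s == a && t == b) := rfl
    by_cases h1 : (a == s) = true
    · have ha : a = s := eq_of_beq h1
      subst ha
      have ih' : List.count t (List.map Prod.snd (List.filter (fun p => p.1 == a) ps))
          = List.count (a, t) ps := by simpa [tsOf] using ih
      simp [tsOf, List.count_cons, ih']
    · have ha : a ≠ s := by simpa using h1
      have h1f : (a == s) = false := beq_eq_false_iff_ne.mpr ha
      have h2 : (s == a) = false := beq_eq_false_iff_ne.mpr (fun e => ha e.symm)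
      have ih' : List.count t (List.map Prod.snd (List.filter (fun p => p.1 == s) ps))
          = List.count (s, t) ps := by simpa [tsOf] using ih
      simp [tsOf, h1f, List.count_cons, ih']
      exact fun e => absurd e ha
def normOf (ps : List (List Int × Int)) : List (List Int × List (Int × Int)) :=
  (PySem.Set.ofList (ps.map Prod.fst)).map
    (fun s => (s, (PySem.Set.ofList (tsOf ps s)).map (fun t => (t, ((tsOf ps s).count t : Int)))))

theorem foldA_items (ps : List (List Int × Int)) :
    ((ps.foldl stepA PySem.Dict.empty).items.map (fun p => (p.1, p.2.items))) = normOf ps := by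
  have hsA : stepA = fun (d : PySem.Dict (List Int) (PySem.Dict Int Int)) p =>
      d.insert p.1 ((d.getD p.1 PySem.Dict.empty).insert p.2
        ((d.getD p.1 PySem.Dict.empty).getD p.2 0 + 1)) := rfl
  have hkeys : (ps.foldl stepA PySem.Dict.empty).keys = PySem.Set.ofList (ps.map Prod.fst) := by
    rw [hsA, PySem.Dict.keys_foldl_insert_key, PySem.Dict.keys_empty, PySem.Set.update_nil_left]
  have hnd : (ps.foldl stepA PySem.Dict.empty).keys.Nodup := by
    rw [hsA]
    exact PySem.Dict.nodup_keys_foldl_insert_key ps _ _ _ (by simp [PySem.Dict.keys_empty])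
  rw [PySem.Dict.items_eq_map_keys _ hnd PySem.Dict.empty, List.map_map, hkeys, normOf]
  refine List.map_congr_left (fun s _ => ?_)
  simp only [Function.comp_apply]
  rw [getD_foldA, PySem.Dict.getD_empty, PySem.Dict.foldl_insert_getD_add_one_eq_counter,
    PySem.Dict.items_counter]

theorem foldR_items (ps : List (List Int × Int)) :
    (((PySem.Dict.counter ps).items.foldl stepR PySem.Dict.empty).items.map
        (fun p => (p.1, p.2.items)))
      = (PySem.Set.ofList (ps.map Prod.fst)).map
          (fun s => (s, ((PySem.Set.ofList ps).filter (fun k => k.1 == s)).map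
            (fun k => (k.2, (ps.count k : Int))))) := by
  have hsR : stepR = fun (r : PySem.Dict (List Int) (PySem.Dict Int Int)) q =>
      r.insert q.1.1 ((r.getD q.1.1 PySem.Dict.empty).insert q.1.2 q.2) := rfl
  have hkeys : ((PySem.Dict.counter ps).items.foldl stepR PySem.Dict.empty).keys
      = PySem.Set.ofList (ps.map Prod.fst) := by
    rw [hsR, PySem.Dict.keys_foldl_insert_key, PySem.Dict.keys_empty, PySem.Set.update_nil_left,
      PySem.Dict.items_counter, List.map_map]
    have : ((fun (q : (List Int × Int) × Int) => q.1.1) ∘ fun k => (k, (ps.count k : Int)))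
        = Prod.fst := rfl
    rw [this, ofList_map_ofList]
  have hnd : ((PySem.Dict.counter ps).items.foldl stepR PySem.Dict.empty).keys.Nodup := by
    rw [hsR]
    exact PySem.Dict.nodup_keys_foldl_insert_key _ _ _ _ (by simp [PySem.Dict.keys_empty])
  rw [PySem.Dict.items_eq_map_keys _ hnd PySem.Dict.empty, List.map_map, hkeys]
  refine List.map_congr_left (fun s _ => ?_)
  simp only [Function.comp_apply]
  rw [getD_foldR, PySem.Dict.getD_empty, PySem.Dict.items_counter, List.filter_map]
  have hpf : ((fun (q : (List Int × Int) × Int) => q.1.1 == s) ∘ fun k => (k, (ps.count k : Int)))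
      = fun (k : List Int × Int) => k.1 == s := rfl
  rw [hpf, List.foldl_map,
    PySem.Dict.items_foldl_insert_fresh _ (fun k => k.2) (fun k => (ps.count k : Int)) _
      (fun a _ => PySem.Dict.contains_empty a.2)
      (by rw [show (fun (k : List Int × Int) => k.2) = Prod.snd from rfl, filter_ofList_map_snd]
          exact PySem.Set.nodup_ofList _)]
  rfl

theorem final_eq (ps : List (List Int × Int)) :
    ((ps.foldl stepA PySem.Dict.empty).items.map (fun p => (p.1, p.2.items)))
      = (((PySem.Dict.counter ps).items.foldl stepR PySem.Dict.empty).items.map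
          (fun p => (p.1, p.2.items))) := by
  rw [foldA_items, foldR_items, normOf]
  refine List.map_congr_left (fun s _ => ?_)
  have h1 : (PySem.Set.ofList (tsOf ps s)).map (fun t => (t, ((tsOf ps s).count t : Int)))
      = ((PySem.Set.ofList ps).filter (fun k => k.1 == s)).map
          (fun k => (k.2, ((tsOf ps s).count k.2 : Int))) := by
    rw [← filter_ofList_map_snd, List.map_map]
    rfl
  rw [h1]
  refine congrArg (fun l => (s, l)) (List.map_congr_left (fun k hk => ?_))
  have hks : k.1 = s := eq_of_beq (List.mem_filter.mp hk).2
  have : (tsOf ps s).count k.2 = ps.count (s, k.2) := count_tsOf ps s k.2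
  rw [this, ← hks]

-- ===== VERDICT (by name: the statement is the Claim_ definition above) =====
theorem build_ngram_transitions_spec : Claim_equal_build_ngram_transitions := by
  intro seq order _ _
  show build_ngram_transitions seq order = build_ngram_transitions_alt seq order
  rw [portA_eq_foldA, portB_eq_foldR, final_eq]
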